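-- pv_equiv track=rewrite | github.com/OliverP255/text-to-geometry | agent/experiments/plot_50_prompts_results.py | _scores_by_category
-- ===== SOURCE A (Python) =====
-- CATEGORY_DEFS: list[tuple[str, tuple[int, int]]] = [
--     ("Classic CAD (dims + steps)", (1, 10)),
--     ("Classic CAD (dims, no steps)", (11, 20)),
--     ("Classic CAD (no dims, no steps)", (21, 30)),
--     ("Classic CAD (vague)", (31, 40)),
--     ("Organic (SDF)", (41, 46)),
-- ]
--
-- def _category_for_prompt_index(n: int) -> str:
--     for name, (lo, hi) in CATEGORY_DEFS:
--         if lo <= n <= hi: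
--             return name
--     raise ValueError(f"Prompt index {n} not in any category")
--
-- def _scores_by_category(rows: list[dict]) -> dict[str, list[int]]:
--     out: dict[str, list[int]] = {name: [] for name, _ in CATEGORY_DEFS}
--     for r in rows:
--         try:
--             cat = _category_for_prompt_index(int(r["n"]))
--         except ValueError:
--             continue
--         out[cat].append(int(r["score"]))
--     return out
-- ===== SOURCE B (Python) =====
-- CATEGORY_DEFS: list[tuple[str, tuple[int, int]]] = [
--     ("Classic CAD (dims + steps)", (1, 10)),
--     ("Classic CAD (dims, no steps)", (11, 20)),
--     ("Classic CAD (no dims, no steps)", (21, 30)),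
--     ("Classic CAD (vague)", (31, 40)),
--     ("Organic (SDF)", (41, 46)),
-- ]
--
--
-- def _scores_by_category(rows: list[dict]) -> dict[str, list[int]]:
--     # Stage 1: parse each row's prompt index once, keeping the row alongside it.
--     indexed = []
--     for r in rows:
--         try:
--             indexed.append((int(r["n"]), r))
--         except ValueError:
--             continue
--     # Stage 2: one filtered pass per category.  The (lo, hi) ranges are disjoint,
--     # so each row lands in at most one bucket and row order is preserved.
--     return {
--         name: [int(r["score"]) for n, r in indexed if lo <= n <= hi]
--         for name, (lo, hi) in CATEGORY_DEFS
--     }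
-- ===== Notes on version B (the rewrite author's own statement) =====
-- stated objective: alternative
-- what changed: B inverts the loop structure: a first pass parses each row's prompt index once, then a dict comprehension builds each category's list with its own filtered pass over the parsed rows, instead of A's single per-row loop that scans the category table and appends into a pre-initialised dict.
import Mathlib
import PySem

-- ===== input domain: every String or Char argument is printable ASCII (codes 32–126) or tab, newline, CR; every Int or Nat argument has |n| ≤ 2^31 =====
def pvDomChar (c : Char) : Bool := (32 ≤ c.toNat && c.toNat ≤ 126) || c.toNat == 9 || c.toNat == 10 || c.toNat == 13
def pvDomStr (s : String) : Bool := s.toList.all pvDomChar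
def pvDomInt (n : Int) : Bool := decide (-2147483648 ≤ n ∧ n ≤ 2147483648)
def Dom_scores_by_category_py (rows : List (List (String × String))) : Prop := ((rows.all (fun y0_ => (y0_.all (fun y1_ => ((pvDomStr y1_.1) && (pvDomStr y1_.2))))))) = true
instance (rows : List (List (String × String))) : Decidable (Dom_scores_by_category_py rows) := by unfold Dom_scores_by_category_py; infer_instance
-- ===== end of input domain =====

-- B re-derives the same buckets by a two-stage pass (parse indices once, then one filtered pass per category) instead of A's single per-row loop; alternative structure, same results.
-- Equivalence is about the RETURN value; neither program mutates its argument.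


-- ===== PORT A =====
def pvCategoryDefs : List (String × (Int × Int)) :=
  [("Classic CAD (dims + steps)", (1, 10)),
   ("Classic CAD (dims, no steps)", (11, 20)),
   ("Classic CAD (no dims, no steps)", (21, 30)),
   ("Classic CAD (vague)", (31, 40)),
   ("Organic (SDF)", (41, 46))]

-- r["k"]: first-match lookup in the row's association list (none = KeyError, excluded by Pre_)
def pvRowGet? (r : List (String × String)) (k : String) : Option String :=
  (r.find? (fun p => p.1 == k)).map (·.2)

-- _category_for_prompt_index: linear scan; none = the ValueError the caller catches
def pvCatScan (n : Int) : List (String × (Int × Int)) → Option String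
  | [] => none
  | (name, lohi) :: rest => if lohi.1 ≤ n ∧ n ≤ lohi.2 then some name else pvCatScan n rest

-- loop body of A: try int(r["n"]); category scan (ValueError → continue); out[cat].append(int(r["score"]))
def pvStepA (out : PySem.Dict String (List Int)) (r : List (String × String)) : PySem.Dict String (List Int) :=
  match pvRowGet? r "n" with
  | none => out            -- KeyError (excluded by Pre_)
  | some s =>
    match PySem.Int.ofStr? s with
    | none => out          -- ValueError caught: continue
    | some n =>
      match pvCatScan n pvCategoryDefs with
      | none => out        -- ValueError caught: continue
      | some cat =>
        match pvRowGet? r "score" with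
        | none => out      -- KeyError (excluded by Pre_)
        | some ss =>
          match PySem.Int.ofStr? ss with
          | none => out    -- ValueError (excluded by Pre_)
          | some sc => out.modify cat [] (· ++ [sc])   -- cat is always a key of out

def scores_by_category_py (rows : List (List (String × String))) : List (String × List Int) :=
  (rows.foldl pvStepA
    (pvCategoryDefs.foldl (fun d p => d.insert p.1 ([] : List Int)) PySem.Dict.empty)).items

-- ===== PORT B =====
-- Stage 1 of B: indexed.append((int(r["n"]), r)) with ValueError → continue
def pvIdxStep (acc : List (Int × List (String × String))) (r : List (String × String)) :
    List (Int × List (String × String)) :=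
  match pvRowGet? r "n" with
  | none => acc            -- KeyError (excluded by Pre_)
  | some s =>
    match PySem.Int.ofStr? s with
    | none => acc          -- ValueError: continue
    | some n => acc ++ [(n, r)]

def pvIndexed (rows : List (List (String × String))) : List (Int × List (String × String)) :=
  rows.foldl pvIdxStep []

-- Stage 2 of B: [int(r["score"]) for n, r in indexed if lo <= n <= hi]
def pvCatScores (lo hi : Int) (indexed : List (Int × List (String × String))) : List Int :=
  indexed.filterMap (fun p =>
    if lo ≤ p.1 ∧ p.1 ≤ hi then
      match pvRowGet? p.2 "score" with
      | none => none       -- KeyError (excluded by Pre_)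
      | some ss => PySem.Int.ofStr? ss   -- none = ValueError (excluded by Pre_)
    else none)

def scores_by_category_py_alt (rows : List (List (String × String))) : List (String × List Int) :=
  let indexed := pvIndexed rows
  (pvCategoryDefs.foldl (fun d p => d.insert p.1 (pvCatScores p.2.1 p.2.2 indexed))
    PySem.Dict.empty).items

-- ===== PRECONDITION & SPEC =====
-- Pre_ excludes exactly the inputs on which the Python A raises: a row missing the "n" key (KeyError),
-- and a row whose "n" parses to an in-range prompt index but whose "score" is missing or not int-parsable
-- (KeyError / ValueError).  B raises in exactly the same situations.
def pvRowOk (r : List (String × String)) : Bool :=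
  match pvRowGet? r "n" with
  | none => false
  | some s =>
    match PySem.Int.ofStr? s with
    | none => true
    | some n =>
      if 1 ≤ n ∧ n ≤ 46 then
        match pvRowGet? r "score" with
        | none => false
        | some ss => (PySem.Int.ofStr? ss).isSome
      else true

def Pre_scores_by_category_py (rows : List (List (String × String))) : Prop :=
  rows.all pvRowOk = true

instance (rows : List (List (String × String))) : Decidable (Pre_scores_by_category_py rows) := by
  unfold Pre_scores_by_category_py; infer_instance

def pvWitness_scores_by_category_py : (List (List (String × String))) :=
  [[("n", "3"), ("score", "7")], [("n", "x"), ("score", "1")], [("n", "99"), ("score", "5")]]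

def Spec_scores_by_category_py (rows : List (List (String × String))) (out : List (String × List Int)) : Prop := out = scores_by_category_py_alt rows
instance (rows : List (List (String × String))) (out : List (String × List Int)) : Decidable (Spec_scores_by_category_py rows out) := by unfold Spec_scores_by_category_py; infer_instance

-- ===== CLAIM (what is proved, stated in full; the proofs are below) =====
def Claim_equal_scores_by_category_py : Prop := ∀ (rows : List (List (String × String))), Dom_scores_by_category_py rows → Pre_scores_by_category_py rows → Spec_scores_by_category_py rows (scores_by_category_py rows)

-- ===== LEMMAS AND PROOFS =====

-- per-row parse (the singleton Stage 1 contributes for one row)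
def pvRowIdx (r : List (String × String)) : List (Int × List (String × String)) :=
  match pvRowGet? r "n" with
  | none => []
  | some s =>
    match PySem.Int.ofStr? s with
    | none => []
    | some n => [(n, r)]

theorem pvIdxStep_eq (acc : List (Int × List (String × String))) (r : List (String × String)) :
    pvIdxStep acc r = acc ++ pvRowIdx r := by
  unfold pvIdxStep pvRowIdx
  rcases h : pvRowGet? r "n" with _ | s
  · simp
  · rcases h2 : PySem.Int.ofStr? s with _ | n <;> simp [h2]

theorem pvIndexed_eq (rows : List (List (String × String))) :
    pvIndexed rows = rows.flatMap pvRowIdx := by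
  unfold pvIndexed
  have h : pvIdxStep = fun acc r => acc ++ pvRowIdx r :=
    funext fun acc => funext fun r => pvIdxStep_eq acc r
  rw [h, PySem.List.foldl_append_eq_flatMap pvRowIdx rows []]
  simp

theorem pvIndexed_cons (r : List (String × String)) (rows : List (List (String × String))) :
    pvIndexed (r :: rows) = pvRowIdx r ++ pvIndexed rows := by
  rw [pvIndexed_eq, pvIndexed_eq, List.flatMap_cons]

theorem pvCatScores_append (lo hi : Int) (xs ys : List (Int × List (String × String))) :
    pvCatScores lo hi (xs ++ ys) = pvCatScores lo hi xs ++ pvCatScores lo hi ys := by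
  unfold pvCatScores; simp [List.filterMap_append]

-- the 5-key dict state A's loop maintains
def pvMk5 (l1 l2 l3 l4 l5 : List Int) : PySem.Dict String (List Int) :=
  PySem.Dict.mk
    [("Classic CAD (dims + steps)", l1),
     ("Classic CAD (dims, no steps)", l2),
     ("Classic CAD (no dims, no steps)", l3),
     ("Classic CAD (vague)", l4),
     ("Organic (SDF)", l5)]

theorem pvStepA_mk5 (l1 l2 l3 l4 l5 : List Int) (r : List (String × String))
    (hok : pvRowOk r = true) :
    pvStepA (pvMk5 l1 l2 l3 l4 l5) r =
      pvMk5 (l1 ++ pvCatScores 1 10 (pvRowIdx r)) (l2 ++ pvCatScores 11 20 (pvRowIdx r))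
            (l3 ++ pvCatScores 21 30 (pvRowIdx r)) (l4 ++ pvCatScores 31 40 (pvRowIdx r))
            (l5 ++ pvCatScores 41 46 (pvRowIdx r)) := by
  rcases h : pvRowGet? r "n" with _ | s
  · simp [pvStepA, pvRowIdx, pvCatScores, h]
  · rcases h2 : PySem.Int.ofStr? s with _ | n
    · simp [pvStepA, pvRowIdx, pvCatScores, h, h2]
    · unfold pvRowOk at hok
      rw [h] at hok
      simp only [h2] at hok
      unfold pvStepA pvRowIdx pvCatScores
      rw [h]
      simp only [h2]
      simp only [List.filterMap_cons, List.filterMap_nil, pvCatScan, pvCategoryDefs]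
      by_cases c1 : ((1:Int) ≤ n ∧ n ≤ 10)
      · rw [if_pos (by omega : (1:Int) ≤ n ∧ n ≤ 46)] at hok
        rcases hs : pvRowGet? r "score" with _ | ss
        · rw [hs] at hok; simp at hok
        · rw [hs] at hok
          simp only [Option.isSome_iff_exists] at hok
          obtain ⟨sc, hsc⟩ := hok
          simp only [if_pos c1, if_neg (by omega : ¬ ((11:Int) ≤ n ∧ n ≤ 20)), if_neg (by omega : ¬ ((21:Int) ≤ n ∧ n ≤ 30)), if_neg (by omega : ¬ ((31:Int) ≤ n ∧ n ≤ 40)), if_neg (by omega : ¬ ((41:Int) ≤ n ∧ n ≤ 46)), hsc]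
          simp [pvMk5, PySem.Dict.modify, PySem.Dict.insert, PySem.Dict.getD,
            PySem.Dict.get?, PySem.Dict.contains]
      · 
        by_cases c2 : ((11:Int) ≤ n ∧ n ≤ 20)
        · rw [if_pos (by omega : (1:Int) ≤ n ∧ n ≤ 46)] at hok
          rcases hs : pvRowGet? r "score" with _ | ss
          · rw [hs] at hok; simp at hok
          · rw [hs] at hok
            simp only [Option.isSome_iff_exists] at hok
            obtain ⟨sc, hsc⟩ := hok
            simp only [if_neg (by omega : ¬ ((1:Int) ≤ n ∧ n ≤ 10)), if_pos c2, if_neg (by omega : ¬ ((21:Int) ≤ n ∧ n ≤ 30)), if_neg (by omega : ¬ ((31:Int) ≤ n ∧ n ≤ 40)), if_neg (by omega : ¬ ((41:Int) ≤ n ∧ n ≤ 46)), hsc]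
            simp [pvMk5, PySem.Dict.modify, PySem.Dict.insert, PySem.Dict.getD,
              PySem.Dict.get?, PySem.Dict.contains]
        · 
          by_cases c3 : ((21:Int) ≤ n ∧ n ≤ 30)
          · rw [if_pos (by omega : (1:Int) ≤ n ∧ n ≤ 46)] at hok
            rcases hs : pvRowGet? r "score" with _ | ss
            · rw [hs] at hok; simp at hok
            · rw [hs] at hok
              simp only [Option.isSome_iff_exists] at hok
              obtain ⟨sc, hsc⟩ := hok
              simp only [if_neg (by omega : ¬ ((1:Int) ≤ n ∧ n ≤ 10)), if_neg (by omega : ¬ ((11:Int) ≤ n ∧ n ≤ 20)), if_pos c3, if_neg (by omega : ¬ ((31:Int) ≤ n ∧ n ≤ 40)), if_neg (by omega : ¬ ((41:Int) ≤ n ∧ n ≤ 46)), hsc]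
              simp [pvMk5, PySem.Dict.modify, PySem.Dict.insert, PySem.Dict.getD,
                PySem.Dict.get?, PySem.Dict.contains]
          · 
            by_cases c4 : ((31:Int) ≤ n ∧ n ≤ 40)
            · rw [if_pos (by omega : (1:Int) ≤ n ∧ n ≤ 46)] at hok
              rcases hs : pvRowGet? r "score" with _ | ss
              · rw [hs] at hok; simp at hok
              · rw [hs] at hok
                simp only [Option.isSome_iff_exists] at hok
                obtain ⟨sc, hsc⟩ := hok
                simp only [if_neg (by omega : ¬ ((1:Int) ≤ n ∧ n ≤ 10)), if_neg (by omega : ¬ ((11:Int) ≤ n ∧ n ≤ 20)), if_neg (by omega : ¬ ((21:Int) ≤ n ∧ n ≤ 30)), if_pos c4, if_neg (by omega : ¬ ((41:Int) ≤ n ∧ n ≤ 46)), hsc]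
                simp [pvMk5, PySem.Dict.modify, PySem.Dict.insert, PySem.Dict.getD,
                  PySem.Dict.get?, PySem.Dict.contains]
            · 
              by_cases c5 : ((41:Int) ≤ n ∧ n ≤ 46)
              · rw [if_pos (by omega : (1:Int) ≤ n ∧ n ≤ 46)] at hok
                rcases hs : pvRowGet? r "score" with _ | ss
                · rw [hs] at hok; simp at hok
                · rw [hs] at hok
                  simp only [Option.isSome_iff_exists] at hok
                  obtain ⟨sc, hsc⟩ := hok
                  simp only [if_neg (by omega : ¬ ((1:Int) ≤ n ∧ n ≤ 10)), if_neg (by omega : ¬ ((11:Int) ≤ n ∧ n ≤ 20)), if_neg (by omega : ¬ ((21:Int) ≤ n ∧ n ≤ 30)), if_neg (by omega : ¬ ((31:Int) ≤ n ∧ n ≤ 40)), if_pos c5, hsc]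
                  simp [pvMk5, PySem.Dict.modify, PySem.Dict.insert, PySem.Dict.getD,
                    PySem.Dict.get?, PySem.Dict.contains]
              · simp only [if_neg c1, if_neg c2, if_neg c3, if_neg c4, if_neg c5]
                simp

theorem pvFoldA (rows : List (List (String × String))) (l1 l2 l3 l4 l5 : List Int)
    (hok : rows.all pvRowOk = true) :
    rows.foldl pvStepA (pvMk5 l1 l2 l3 l4 l5) =
      pvMk5 (l1 ++ pvCatScores 1 10 (pvIndexed rows)) (l2 ++ pvCatScores 11 20 (pvIndexed rows))
            (l3 ++ pvCatScores 21 30 (pvIndexed rows)) (l4 ++ pvCatScores 31 40 (pvIndexed rows))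
            (l5 ++ pvCatScores 41 46 (pvIndexed rows)) := by
  induction rows generalizing l1 l2 l3 l4 l5 with
  | nil => simp [pvIndexed, pvCatScores]
  | cons r rows ih =>
    simp only [List.all_cons, Bool.and_eq_true] at hok
    rw [List.foldl_cons, pvStepA_mk5 _ _ _ _ _ _ hok.1, ih _ _ _ _ _ hok.2,
        pvIndexed_cons, pvCatScores_append, pvCatScores_append, pvCatScores_append,
        pvCatScores_append, pvCatScores_append]
    simp [List.append_assoc]

-- ===== VERDICT (by name: the statement is the Claim_ definition above) =====
theorem scores_by_category_py_spec : Claim_equal_scores_by_category_py := by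
  intro rows _ hpre
  unfold Spec_scores_by_category_py scores_by_category_py scores_by_category_py_alt
  have hinit : (pvCategoryDefs.foldl (fun d p => d.insert p.1 ([] : List Int)) PySem.Dict.empty)
      = pvMk5 [] [] [] [] [] := by decide
  rw [hinit, pvFoldA rows [] [] [] [] [] hpre]
  simp [pvMk5, pvCategoryDefs, PySem.Dict.insert, PySem.Dict.contains, PySem.Dict.empty]
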